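-- pv_equiv track=rewrite | github.com/molnrb/Developer-Assistant | Developer-Assistant-BE/src/generate/project_core.py | json_to_tree_string
-- ===== SOURCE A (Python) =====
-- from typing import Any, Dict
--
-- def json_to_tree_string(data: Dict[str, Any]) -> str:
--     """Convert a plan dict to a tree-like string representation."""
--
--     root: Dict[str, Any] = {}
--
--     for f in data.get("files", []):
--         path = f["name"]
--         parts = path.split("/")
--
--         current = root
--         for i, part in enumerate(parts):
--             is_file = i == len(parts) - 1
--             if part not in current:
--                 current[part] = {"is_file": is_file, "children": {}}
--             if not is_file:
--                 current = current[part]["children"]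
--
--     lines = ["."]
--
--     def render(node: Dict[str, Any], prefix: str = ""):
--         items = sorted(node.items(), key=lambda kv: (kv[1]["is_file"], kv[0].lower()))
--
--         for index, (name, meta) in enumerate(items):
--             is_last = index == len(items) - 1
--             connector = "└── " if is_last else "├── "
--             lines.append(prefix + connector + name)
--             if meta["children"]:
--                 new_prefix = prefix + ("    " if is_last else "│   ")
--                 render(meta["children"], new_prefix)
--
--     render(root)
--     return "\n".join(lines)
-- ===== SOURCE B (Python) =====
-- def json_to_tree_string(data):
--     """Convert a plan dict to a tree-like string representation.
--
--     Same trie build as before; the rendering is an explicit-stack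
--     iterative pre-order DFS instead of recursion."""
--
--     root = {}
--
--     for f in data.get("files", []):
--         path = f["name"]
--         parts = path.split("/")
--
--         current = root
--         for i, part in enumerate(parts):
--             is_file = i == len(parts) - 1
--             if part not in current:
--                 current[part] = {"is_file": is_file, "children": {}}
--             if not is_file:
--                 current = current[part]["children"]
--
--     def ordered(node):
--         items = sorted(node.items(), key=lambda kv: (kv[1]["is_file"], kv[0].lower()))
--         return [(name, meta, i == len(items) - 1) for i, (name, meta) in enumerate(items)]
--
--     lines = ["."]
--     stack = [(name, meta, "", last) for name, meta, last in reversed(ordered(root))]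
--     while stack:
--         name, meta, prefix, is_last = stack.pop()
--         lines.append(prefix + ("└── " if is_last else "├── ") + name)
--         if meta["children"]:
--             child_prefix = prefix + ("    " if is_last else "│   ")
--             stack.extend(
--                 (n, m, child_prefix, l) for n, m, l in reversed(ordered(meta["children"]))
--             )
--     return "\n".join(lines)
-- ===== Notes on version B (the rewrite author's own statement) =====
-- stated objective: alternative
-- what changed: The recursive render helper is replaced by an iterative pre-order DFS over an explicit stack of (name, node, prefix, is_last) entries (children pushed in reverse onto a tail-pop stack); the trie build and the (is_file, name.lower()) sort key are unchanged.
import Mathlib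
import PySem

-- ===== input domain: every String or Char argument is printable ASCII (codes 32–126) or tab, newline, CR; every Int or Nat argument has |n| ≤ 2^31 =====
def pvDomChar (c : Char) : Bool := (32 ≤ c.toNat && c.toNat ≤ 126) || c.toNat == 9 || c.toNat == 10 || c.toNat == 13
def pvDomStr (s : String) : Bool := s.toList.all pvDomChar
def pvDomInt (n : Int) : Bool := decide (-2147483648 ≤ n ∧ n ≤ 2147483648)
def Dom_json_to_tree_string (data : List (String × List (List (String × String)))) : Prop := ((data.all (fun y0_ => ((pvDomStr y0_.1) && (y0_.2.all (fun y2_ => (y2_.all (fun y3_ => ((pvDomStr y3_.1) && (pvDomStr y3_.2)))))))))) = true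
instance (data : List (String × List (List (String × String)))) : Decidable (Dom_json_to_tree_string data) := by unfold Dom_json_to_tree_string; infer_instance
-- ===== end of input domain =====

-- B replaces A's recursive render with an explicit-stack iterative pre-order DFS (same trie build, same sort key); objective: alternative decomposition, same cost.

-- ===== PORT A =====
-- the nested Python dicts {part: {"is_file": bool, "children": {...}}} as a mutual inductive
-- (insertion-ordered association structure; shared by both ports, as both Pythons build it identically)
mutual
inductive PNode : Type where
  | mk : Bool → PChildren → PNode
inductive PChildren : Type where
  | nil : PChildren
  | cons : String → PNode → PChildren → PChildren
end

def PNode.isFile : PNode → Bool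
  | .mk b _ => b

def PNode.children : PNode → PChildren
  | .mk _ c => c

def PChildren.find? : PChildren → String → Option PNode
  | .nil, _ => none
  | .cons k v t, s => if k == s then some v else PChildren.find? t s

-- dict write: overwrite keeps position, a new key appends (Python dict semantics)
def PChildren.setOrAppend : PChildren → String → PNode → PChildren
  | .nil, k, v => .cons k v .nil
  | .cons k' v' t, k, v => if k' == k then .cons k' v t else .cons k' v' (PChildren.setOrAppend t k v)

def PChildren.toList : PChildren → List (String × PNode)
  | .nil => []
  | .cons k v t => (k, v) :: PChildren.toList t

-- the inner `for i, part in enumerate(parts)` walk of A's build loop, as recursion on parts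
def insertParts : PChildren → List String → PChildren
  | m, [] => m
  | m, [part] =>
      match m.find? part with
      | some _ => m
      | none => m.setOrAppend part (PNode.mk true .nil)
  | m, part :: rest =>
      match m.find? part with
      | some node => m.setOrAppend part (PNode.mk node.isFile (insertParts node.children rest))
      | none => m.setOrAppend part (PNode.mk false (insertParts .nil rest))

-- `for f in data.get("files", []): ... path.split("/") ...`; on a missing "name" key Python
-- raises KeyError (excluded by Pre_), the port skips that file
def buildRoot (data : List (String × List (List (String × String)))) : PChildren :=
  (PySem.Dict.getD (PySem.Dict.mk data) "files" []).foldl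
    (fun root f =>
      match PySem.Dict.get? (PySem.Dict.mk f) "name" with
      | some path => insertParts root ((PySem.Str.split? path "/").getD [])  -- split? is always some: "/" ≠ ""
      | none => root)
    .nil

-- sorted(node.items(), key=lambda kv: (kv[1]["is_file"], kv[0].lower()))
def sortItems (m : PChildren) : List (String × PNode) :=
  PySem.List.sorted2 m.toList (fun kv => kv.2.isFile) (fun kv => PySem.Str.lower kv.1)

-- size measures (computable; they only provide the fuel bounds of the two renderers)
mutual
def PNode.psize : PNode → Nat
  | .mk _ c => 1 + c.psize
def PChildren.psize : PChildren → Nat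
  | .nil => 1
  | .cons _ v t => 1 + v.psize + t.psize
end

def entriesSize (l : List (String × PNode)) : Nat := (l.map (fun kv => kv.2.psize)).sum

-- A's recursive render: walks the sorted items, last item gets "└── ", others "├── "
-- (the fuel argument only makes the recursion structural; `entriesSize items + 1` always suffices)
def renderFuel : Nat → List (String × PNode) → String → List String
  | 0, _, _ => []
  | _ + 1, [], _ => []
  | fuel + 1, [(name, nd)], pre =>
      (pre ++ "└── " ++ name) ::
      (match nd.children with
       | .nil => []
       | .cons k v t => renderFuel fuel (sortItems (.cons k v t)) (pre ++ "    "))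
  | fuel + 1, (name, nd) :: rest, pre =>
      (pre ++ "├── " ++ name) ::
      ((match nd.children with
        | .nil => []
        | .cons k v t => renderFuel fuel (sortItems (.cons k v t)) (pre ++ "│   ")) ++
       renderFuel fuel rest pre)

def json_to_tree_string (data : List (String × List (List (String × String)))) : String :=
  let items := sortItems (buildRoot data)
  PySem.Str.join "\n" (["."] ++ renderFuel (entriesSize items + 1) items "")

-- ===== PORT B =====
-- ordered(node): the sorted items annotated with their is-last flag (enumerate comparison)
def orderedB (m : PChildren) : List (String × PNode × Bool) :=
  let items := sortItems m
  (PySem.List.enumerate items).map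
    (fun p => (p.2.1, p.2.2, decide (p.1 = (items.length : Int) - 1)))

def stackSize (s : List (String × PNode × String × Bool)) : Nat :=
  (s.map (fun e => e.2.1.psize)).sum

-- the while-stack loop: pop the head, append the line, push the (already-ordered)
-- children entries on top (Python pushes them reversed onto a tail-pop stack — same order;
-- the fuel argument only makes the loop structural; `stackSize stack + 1` always suffices)
def stackRunFuel : Nat → List (String × PNode × String × Bool) → List String → List String
  | 0, _, lines => lines
  | _ + 1, [], lines => lines
  | fuel + 1, (name, nd, pre, isLast) :: rest, lines =>
      let lines' := lines ++ [pre ++ (if isLast then "└── " else "├── ") ++ name]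
      match nd.children with
      | .nil => stackRunFuel fuel rest lines'
      | .cons k v t =>
          let cpre := pre ++ (if isLast then "    " else "│   ")
          stackRunFuel fuel
            (((orderedB (.cons k v t)).map (fun e => (e.1, e.2.1, cpre, e.2.2))) ++ rest) lines'

def json_to_tree_string_alt (data : List (String × List (List (String × String)))) : String :=
  let stack := (orderedB (buildRoot data)).map (fun e => (e.1, e.2.1, "", e.2.2))
  PySem.Str.join "\n" ("." :: stackRunFuel (stackSize stack + 1) stack [])

-- ===== PRECONDITION & SPEC =====
-- Pre_ excludes exactly the inputs where some entry of the "files" list lacks a "name" key: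
-- there Python A raises KeyError.
def Pre_json_to_tree_string (data : List (String × List (List (String × String)))) : Prop :=
  ((PySem.Dict.getD (PySem.Dict.mk data) "files" []).all
    (fun f => (PySem.Dict.get? (PySem.Dict.mk f) "name").isSome)) = true

instance (data : List (String × List (List (String × String)))) : Decidable (Pre_json_to_tree_string data) := by
  unfold Pre_json_to_tree_string; infer_instance

def pvWitness_json_to_tree_string : (List (String × List (List (String × String)))) :=
  [("files", [[("name", "src/app.py")], [("name", "src")], [("name", "README.md")]])]

def Spec_json_to_tree_string (data : List (String × List (List (String × String)))) (out : String) : Prop := out = json_to_tree_string_alt data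
instance (data : List (String × List (List (String × String)))) (out : String) : Decidable (Spec_json_to_tree_string data out) := by unfold Spec_json_to_tree_string; infer_instance

-- ===== CLAIM (what is proved, stated in full; the proofs are below) =====
def Claim_equal_json_to_tree_string : Prop := ∀ (data : List (String × List (List (String × String)))), Dom_json_to_tree_string data → Pre_json_to_tree_string data → Spec_json_to_tree_string data (json_to_tree_string data)


-- ===== LEMMAS AND PROOFS =====

theorem entriesSize_perm {l1 l2 : List (String × PNode)} (h : l1.Perm l2) :
    entriesSize l1 = entriesSize l2 := (h.map _).sum_eq

theorem entriesSize_toList_lt : ∀ (m : PChildren), entriesSize m.toList < m.psize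
  | .nil => by simp [PChildren.toList, entriesSize, PChildren.psize]
  | .cons k v t => by
      have ht := entriesSize_toList_lt t
      simp [PChildren.toList, entriesSize, PChildren.psize] at *
      omega

theorem entriesSize_sortItems (m : PChildren) :
    entriesSize (sortItems m) = entriesSize m.toList :=
  entriesSize_perm (PySem.List.sorted2_perm _ _ _ _)

theorem pnode_psize_pos (nd : PNode) : 0 < nd.psize := by
  cases nd with
  | mk b c => simp [PNode.psize]

theorem entriesSize_sortItems_lt (nd : PNode) :
    entriesSize (sortItems nd.children) < nd.psize := by
  cases nd with
  | mk b c =>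
    have h := entriesSize_toList_lt c
    rw [entriesSize_sortItems]
    simp [PNode.children, PNode.psize]
    omega

theorem sum_psize_enumerate : ∀ (l : List (String × PNode)) (s : Int)
    (f : (Int × String × PNode) → Nat), (∀ p, f p = p.2.2.psize) →
    ((PySem.List.enumerate l s).map f).sum = entriesSize l := by
  intro l
  induction l with
  | nil => intro s f hf; simp [PySem.List.enumerate_nil, entriesSize]
  | cons x xs ih =>
    intro s f hf
    rw [PySem.List.enumerate_cons]
    simp only [List.map_cons, List.sum_cons, hf]
    rw [ih (s+1) f hf]
    simp [entriesSize]

theorem stackSize_entries (c : PChildren) (cpre : String) :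
    stackSize ((orderedB c).map (fun e => (e.1, e.2.1, cpre, e.2.2))) =
      entriesSize (sortItems c) := by
  simp only [stackSize, orderedB, List.map_map]
  exact sum_psize_enumerate _ _ _ (fun p => rfl)

-- is-last annotation of a list, by shape (the bridge between B's enumerate flag and A's
-- last-vs-rest pattern split)
def markLast : List (String × PNode) → List (String × PNode × Bool)
  | [] => []
  | [(n, nd)] => [(n, nd, true)]
  | (n, nd) :: rest => (n, nd, false) :: markLast rest

theorem enumerate_flag_eq_markLast : ∀ (l : List (String × PNode)) (s : Int),
    ((PySem.List.enumerate l s).map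
      (fun p => (p.2.1, p.2.2, decide (p.1 = s + l.length - 1)))) = markLast l := by
  intro l
  induction l with
  | nil => intro s; simp [PySem.List.enumerate_nil, markLast]
  | cons x xs ih =>
    intro s
    obtain ⟨n, nd⟩ := x
    rw [PySem.List.enumerate_cons]
    cases xs with
    | nil => simp [PySem.List.enumerate_nil, markLast]
    | cons y ys =>
      simp only [List.map_cons, markLast]
      rw [List.cons_eq_cons]
      refine ⟨?_, ?_⟩
      · have hne : ¬ (s = s + ((ys.length : Int) + 1 + 1) - 1) := by omega
        simp [hne]
      · have harg : s + (((n, nd) :: y :: ys).length : Int) - 1 =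
            (s + 1) + (((y :: ys).length : Int)) - 1 := by
          simp only [List.length_cons]; push_cast; omega
        simp only [harg]
        exact ih (s + 1)

theorem orderedB_eq_markLast (m : PChildren) : orderedB m = markLast (sortItems m) := by
  have h := enumerate_flag_eq_markLast (sortItems m) 0
  simp only [zero_add] at h
  simpa [orderedB] using h

theorem stackSize_markLast : ∀ (items : List (String × PNode)) (pre : String),
    stackSize ((markLast items).map (fun e => (e.1, e.2.1, pre, e.2.2))) =
      entriesSize items
  | [], _ => by simp [markLast, stackSize, entriesSize]
  | [(n, nd)], _ => by simp [markLast, stackSize, entriesSize]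
  | (n, nd) :: y :: rest, pre => by
      have ih := stackSize_markLast (y :: rest) pre
      simp only [markLast, List.map_cons, stackSize, List.sum_cons, entriesSize] at *
      omega

theorem stackRunFuel_nil : ∀ (g : Nat) (lines : List String),
    stackRunFuel g [] lines = lines := by
  intro g lines; cases g <;> simp [stackRunFuel]

-- fuel irrelevance: any fuel above the stack measure computes the same run
theorem stackRun_irr : ∀ (N f f' : Nat) (s : List (String × PNode × String × Bool))
    (l : List String), stackSize s ≤ N → stackSize s < f → stackSize s < f' →
    stackRunFuel f s l = stackRunFuel f' s l := by
  intro N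
  induction N with
  | zero =>
    intro f f' s l hs hf hf'
    cases s with
    | nil =>
      obtain ⟨f, rfl⟩ : ∃ g, f = g + 1 := ⟨f - 1, by omega⟩
      obtain ⟨f', rfl⟩ : ∃ g, f' = g + 1 := ⟨f' - 1, by omega⟩
      simp [stackRunFuel]
    | cons e rest =>
      exfalso
      obtain ⟨name, nd, pre, isLast⟩ := e
      have := pnode_psize_pos nd
      simp [stackSize] at hs
      omega
  | succ N ih =>
    intro f f' s l hs hf hf'
    obtain ⟨f, rfl⟩ : ∃ g, f = g + 1 := ⟨f - 1, by omega⟩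
    obtain ⟨f', rfl⟩ : ∃ g, f' = g + 1 := ⟨f' - 1, by omega⟩
    cases s with
    | nil => simp [stackRunFuel]
    | cons e rest =>
      obtain ⟨name, nd, pre, isLast⟩ := e
      have hpos := pnode_psize_pos nd
      have hsz : stackSize ((name, nd, pre, isLast) :: rest) =
          nd.psize + stackSize rest := by
        simp [stackSize]
      cases hch : nd.children with
      | nil =>
        simp only [stackRunFuel, hch]
        exact ih f f' rest _ (by simp only [stackSize, entriesSize, List.map_append, List.sum_append, List.map_cons, List.sum_cons] at *; omega) (by simp only [stackSize, entriesSize, List.map_append, List.sum_append, List.map_cons, List.sum_cons] at *; omega) (by simp only [stackSize, entriesSize, List.map_append, List.sum_append, List.map_cons, List.sum_cons] at *; omega)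
      | cons k v t =>
        simp only [stackRunFuel, hch]
        have h1 := stackSize_entries (PChildren.cons k v t)
          (pre ++ (if isLast then "    " else "│   "))
        have h2 := entriesSize_sortItems_lt nd
        rw [hch] at h2
        have hb : stackSize (((orderedB (PChildren.cons k v t)).map
            (fun e => (e.1, e.2.1, pre ++ (if isLast then "    " else "│   "), e.2.2))) ++ rest)
            ≤ N := by
          simp only [stackSize, entriesSize, List.map_append, List.sum_append,
            List.map_cons, List.sum_cons] at *
          omega
        exact ih f f' _ _ hb (by simp only [stackSize, entriesSize, List.map_append, List.sum_append, List.map_cons, List.sum_cons] at *; omega) (by simp only [stackSize, entriesSize, List.map_append, List.sum_append, List.map_cons, List.sum_cons] at *; omega)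

-- accumulator lemma: the lines list is only ever appended to
theorem stackRun_acc : ∀ (N f : Nat) (s : List (String × PNode × String × Bool))
    (l : List String), stackSize s ≤ N → stackSize s < f →
    stackRunFuel f s l = l ++ stackRunFuel f s [] := by
  intro N
  induction N with
  | zero =>
    intro f s l hs hf
    cases s with
    | nil =>
      obtain ⟨f, rfl⟩ : ∃ g, f = g + 1 := ⟨f - 1, by omega⟩
      simp [stackRunFuel]
    | cons e rest =>
      exfalso
      obtain ⟨name, nd, pre, isLast⟩ := e
      have := pnode_psize_pos nd
      simp [stackSize] at hs
      omega
  | succ N ih =>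
    intro f s l hs hf
    obtain ⟨f, rfl⟩ : ∃ g, f = g + 1 := ⟨f - 1, by omega⟩
    cases s with
    | nil => simp [stackRunFuel]
    | cons e rest =>
      obtain ⟨name, nd, pre, isLast⟩ := e
      have hpos := pnode_psize_pos nd
      have hsz : stackSize ((name, nd, pre, isLast) :: rest) =
          nd.psize + stackSize rest := by
        simp [stackSize]
      cases hch : nd.children with
      | nil =>
        simp only [stackRunFuel, hch, List.nil_append]
        rw [ih f rest _ (by simp only [stackSize, entriesSize, List.map_append, List.sum_append, List.map_cons, List.sum_cons] at *; omega) (by simp only [stackSize, entriesSize, List.map_append, List.sum_append, List.map_cons, List.sum_cons] at *; omega),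
          ih f rest [pre ++ (if isLast then "└── " else "├── ") ++ name] (by simp only [stackSize, entriesSize, List.map_append, List.sum_append, List.map_cons, List.sum_cons] at *; omega) (by simp only [stackSize, entriesSize, List.map_append, List.sum_append, List.map_cons, List.sum_cons] at *; omega)]
        simp
      | cons k v t =>
        simp only [stackRunFuel, hch, List.nil_append]
        have h1 := stackSize_entries (PChildren.cons k v t)
          (pre ++ (if isLast then "    " else "│   "))
        have h2 := entriesSize_sortItems_lt nd
        rw [hch] at h2
        set entries := (orderedB (PChildren.cons k v t)).map
          (fun e => (e.1, e.2.1, pre ++ (if isLast then "    " else "│   "), e.2.2)) with hent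
        have hbound : stackSize (entries ++ rest) ≤ N := by
          simp only [stackSize, entriesSize, List.map_append, List.sum_append,
            List.map_cons, List.sum_cons] at *
          omega
        rw [ih f (entries ++ rest) _ hbound (by simp only [stackSize, entriesSize, List.map_append, List.sum_append, List.map_cons, List.sum_cons] at *; omega),
          ih f (entries ++ rest) [pre ++ (if isLast then "└── " else "├── ") ++ name]
            hbound (by simp only [stackSize, entriesSize, List.map_append, List.sum_append, List.map_cons, List.sum_cons] at *; omega)]
        simp

-- splitting lemma: running a concatenated stack = running the parts in order
theorem stackRun_split : ∀ (N f : Nat) (s1 s2 : List (String × PNode × String × Bool))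
    (l : List String), stackSize s1 + stackSize s2 ≤ N → stackSize s1 + stackSize s2 < f →
    stackRunFuel f (s1 ++ s2) l = stackRunFuel f s2 (stackRunFuel f s1 l) := by
  intro N
  induction N with
  | zero =>
    intro f s1 s2 l hs hf
    cases s1 with
    | nil =>
      obtain ⟨f, rfl⟩ : ∃ g, f = g + 1 := ⟨f - 1, by omega⟩
      simp [stackRunFuel]
    | cons e rest =>
      exfalso
      obtain ⟨name, nd, pre, isLast⟩ := e
      have := pnode_psize_pos nd
      simp [stackSize] at hs
      omega
  | succ N ih =>
    intro f s1 s2 l hs hf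
    obtain ⟨f, rfl⟩ : ∃ g, f = g + 1 := ⟨f - 1, by omega⟩
    cases s1 with
    | nil => simp [stackRunFuel]
    | cons e rest =>
      obtain ⟨name, nd, pre, isLast⟩ := e
      have hpos := pnode_psize_pos nd
      have hsz : stackSize ((name, nd, pre, isLast) :: rest) =
          nd.psize + stackSize rest := by
        simp [stackSize]
      rw [List.cons_append]
      cases hch : nd.children with
      | nil =>
        simp only [stackRunFuel, hch]
        rw [ih f rest s2 _ (by simp only [stackSize, entriesSize, List.map_append, List.sum_append, List.map_cons, List.sum_cons] at *; omega) (by simp only [stackSize, entriesSize, List.map_append, List.sum_append, List.map_cons, List.sum_cons] at *; omega)]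
        exact stackRun_irr N f (f + 1) s2 _ (by simp only [stackSize, entriesSize, List.map_append, List.sum_append, List.map_cons, List.sum_cons] at *; omega) (by simp only [stackSize, entriesSize, List.map_append, List.sum_append, List.map_cons, List.sum_cons] at *; omega) (by simp only [stackSize, entriesSize, List.map_append, List.sum_append, List.map_cons, List.sum_cons] at *; omega)
      | cons k v t =>
        simp only [stackRunFuel, hch]
        have h1 := stackSize_entries (PChildren.cons k v t)
          (pre ++ (if isLast then "    " else "│   "))
        have h2 := entriesSize_sortItems_lt nd
        rw [hch] at h2
        set entries := (orderedB (PChildren.cons k v t)).map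
          (fun e => (e.1, e.2.1, pre ++ (if isLast then "    " else "│   "), e.2.2)) with hent
        have hb1 : stackSize (entries ++ rest) ≤ N := by
          simp only [stackSize, entriesSize, List.map_append, List.sum_append,
            List.map_cons, List.sum_cons] at *
          omega
        have hb2 : stackSize (entries ++ rest) + stackSize s2 ≤ N := by
          simp only [stackSize, entriesSize, List.map_append, List.sum_append,
            List.map_cons, List.sum_cons] at *
          omega
        rw [← List.append_assoc, ih f (entries ++ rest) s2 _ hb2 (by simp only [stackSize, entriesSize, List.map_append, List.sum_append, List.map_cons, List.sum_cons] at *; omega)]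
        exact stackRun_irr N f (f + 1) s2 _ (by simp only [stackSize, entriesSize, List.map_append, List.sum_append, List.map_cons, List.sum_cons] at *; omega) (by simp only [stackSize, entriesSize, List.map_append, List.sum_append, List.map_cons, List.sum_cons] at *; omega) (by simp only [stackSize, entriesSize, List.map_append, List.sum_append, List.map_cons, List.sum_cons] at *; omega)

-- the heart: A's recursive render equals B's stack loop on the is-last-annotated items
theorem render_eq_stack : ∀ (N f g : Nat) (items : List (String × PNode)) (pre : String),
    entriesSize items ≤ N → entriesSize items < f → entriesSize items < g →
    renderFuel f items pre =
      stackRunFuel g ((markLast items).map (fun e => (e.1, e.2.1, pre, e.2.2))) [] := by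
  intro N
  induction N with
  | zero =>
    intro f g items pre h hf hg
    obtain ⟨f, rfl⟩ : ∃ x, f = x + 1 := ⟨f - 1, by omega⟩
    obtain ⟨g, rfl⟩ : ∃ x, g = x + 1 := ⟨g - 1, by omega⟩
    cases items with
    | nil => simp [renderFuel, markLast, stackRunFuel]
    | cons x rest =>
      exfalso
      have := pnode_psize_pos x.2
      simp [entriesSize] at h
      omega
  | succ N ih =>
    intro f g items pre h hf hg
    obtain ⟨f, rfl⟩ : ∃ x, f = x + 1 := ⟨f - 1, by omega⟩
    obtain ⟨g, rfl⟩ : ∃ x, g = x + 1 := ⟨g - 1, by omega⟩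
    match items with
    | [] => simp [renderFuel, markLast, stackRunFuel]
    | [(n, nd)] =>
      have hpos := pnode_psize_pos nd
      have hsz : entriesSize [(n, nd)] = nd.psize := by simp [entriesSize]
      simp only [markLast, List.map_cons, List.map_nil]
      cases hch : nd.children with
      | nil => simp [renderFuel, stackRunFuel, hch, stackRunFuel_nil]
      | cons k v t =>
        simp only [renderFuel, stackRunFuel, hch, eq_self_iff_true, if_true,
          List.nil_append, List.append_nil]
        have h2 := entriesSize_sortItems_lt nd
        rw [hch] at h2
        have hE := stackSize_entries (PChildren.cons k v t) (pre ++ "    ")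
        rw [stackRun_acc N g _ _ (by simp only [stackSize, entriesSize, List.map_append, List.sum_append, List.map_cons, List.sum_cons] at *; omega) (by simp only [stackSize, entriesSize, List.map_append, List.sum_append, List.map_cons, List.sum_cons] at *; omega),
          orderedB_eq_markLast,
          ← ih f g (sortItems (PChildren.cons k v t)) (pre ++ "    ")
            (by simp only [stackSize, entriesSize, List.map_append, List.sum_append, List.map_cons, List.sum_cons] at *; omega) (by simp only [stackSize, entriesSize, List.map_append, List.sum_append, List.map_cons, List.sum_cons] at *; omega) (by simp only [stackSize, entriesSize, List.map_append, List.sum_append, List.map_cons, List.sum_cons] at *; omega)]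
        simp
    | (n, nd) :: y :: rest =>
      have hpos := pnode_psize_pos nd
      have hsz : entriesSize ((n, nd) :: y :: rest) =
          nd.psize + entriesSize (y :: rest) := by
        simp [entriesSize]
      simp only [markLast, List.map_cons]
      cases hch : nd.children with
      | nil =>
        simp only [renderFuel, stackRunFuel, hch, Bool.false_eq_true, if_false,
          List.nil_append]
        rw [stackRun_acc N g _ _ (by rw [stackSize_markLast]; simp only [stackSize, entriesSize, List.map_append, List.sum_append, List.map_cons, List.sum_cons] at *; omega)
            (by rw [stackSize_markLast]; simp only [stackSize, entriesSize, List.map_append, List.sum_append, List.map_cons, List.sum_cons] at *; omega),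
          ← ih f g (y :: rest) pre (by simp only [stackSize, entriesSize, List.map_append, List.sum_append, List.map_cons, List.sum_cons] at *; omega) (by simp only [stackSize, entriesSize, List.map_append, List.sum_append, List.map_cons, List.sum_cons] at *; omega) (by simp only [stackSize, entriesSize, List.map_append, List.sum_append, List.map_cons, List.sum_cons] at *; omega)]
        simp
      | cons k v t =>
        simp only [renderFuel, stackRunFuel, hch, Bool.false_eq_true, if_false,
          List.nil_append]
        have h2 := entriesSize_sortItems_lt nd
        rw [hch] at h2
        have hE := stackSize_entries (PChildren.cons k v t) (pre ++ "│   ")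
        have hM := stackSize_markLast (y :: rest) pre
        rw [orderedB_eq_markLast,
          stackRun_split N g _ _ _ (by rw [stackSize_markLast]; simp only [stackSize, entriesSize, List.map_append, List.sum_append, List.map_cons, List.sum_cons] at *; omega)
            (by rw [stackSize_markLast]; simp only [stackSize, entriesSize, List.map_append, List.sum_append, List.map_cons, List.sum_cons] at *; omega),
          stackRun_acc N g ((markLast (sortItems (PChildren.cons k v t))).map
            (fun e => (e.1, e.2.1, pre ++ "│   ", e.2.2)))
            [pre ++ "├── " ++ n]
            (by rw [stackSize_markLast]; simp only [stackSize, entriesSize, List.map_append, List.sum_append, List.map_cons, List.sum_cons] at *; omega) (by rw [stackSize_markLast]; simp only [stackSize, entriesSize, List.map_append, List.sum_append, List.map_cons, List.sum_cons] at *; omega),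
          ← ih f g (sortItems (PChildren.cons k v t)) (pre ++ "│   ")
            (by simp only [stackSize, entriesSize, List.map_append, List.sum_append, List.map_cons, List.sum_cons] at *; omega) (by simp only [stackSize, entriesSize, List.map_append, List.sum_append, List.map_cons, List.sum_cons] at *; omega) (by simp only [stackSize, entriesSize, List.map_append, List.sum_append, List.map_cons, List.sum_cons] at *; omega),
          stackRun_acc N g ((markLast (y :: rest)).map (fun e => (e.1, e.2.1, pre, e.2.2)))
            _ (by simp only [stackSize, entriesSize, List.map_append, List.sum_append, List.map_cons, List.sum_cons] at *; omega) (by simp only [stackSize, entriesSize, List.map_append, List.sum_append, List.map_cons, List.sum_cons] at *; omega),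
          ← ih f g (y :: rest) pre (by simp only [stackSize, entriesSize, List.map_append, List.sum_append, List.map_cons, List.sum_cons] at *; omega) (by simp only [stackSize, entriesSize, List.map_append, List.sum_append, List.map_cons, List.sum_cons] at *; omega) (by simp only [stackSize, entriesSize, List.map_append, List.sum_append, List.map_cons, List.sum_cons] at *; omega)]
        simp

-- ===== VERDICT (by name: the statement is the Claim_ definition above) =====
theorem json_to_tree_string_spec : Claim_equal_json_to_tree_string := by
  intro data _ _
  unfold Spec_json_to_tree_string json_to_tree_string json_to_tree_string_alt
  rw [orderedB_eq_markLast]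
  dsimp only
  rw [stackSize_markLast]
  rw [← render_eq_stack (entriesSize (sortItems (buildRoot data)))
    (entriesSize (sortItems (buildRoot data)) + 1)
    (entriesSize (sortItems (buildRoot data)) + 1)
    (sortItems (buildRoot data)) "" le_rfl (by simp only [stackSize, entriesSize, List.map_append, List.sum_append, List.map_cons, List.sum_cons] at *; omega) (by simp only [stackSize, entriesSize, List.map_append, List.sum_append, List.map_cons, List.sum_cons] at *; omega)]
  simp
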